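-- pv_equiv track=rewrite | github.com/CHOI-WON-KEUN/python-workspace | time_table.py | fill_down_on_column
-- ===== SOURCE A (Python) =====
-- def fill_down_on_column( tuples, col_num ) :
--     output = [ ]
--     curr_val = 'BLANK'
--     for rec in tuples :
--         if len(rec[ col_num ]) > 0 :
--             curr_val = rec[ col_num ]
--         out_rec = rec[:]
--         out_rec[col_num] = curr_val
--         output.append(out_rec)
--     return output
-- ===== SOURCE B (Python) =====
-- def fill_down_on_column(tuples, col_num):
--     # Segment algorithm: repeatedly scan ahead for the next non-blank cell,
--     # fill the whole run of blank-celled records with the current value at once,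
--     # then the non-blank record starts the next segment with its own value.
--     output = []
--     val = 'BLANK'
--     i, n = 0, len(tuples)
--     while i < n:
--         j = i
--         while j < n and len(tuples[j][col_num]) == 0:
--             j += 1
--         for rec in tuples[i:j]:
--             out_rec = rec[:]
--             out_rec[col_num] = val
--             output.append(out_rec)
--         if j < n:
--             val = tuples[j][col_num]
--             out_rec = tuples[j][:]
--             out_rec[col_num] = val
--             output.append(out_rec)
--         i = j + 1
--     return output
-- ===== Notes on version B (the rewrite author's own statement) =====
-- stated objective: alternative
-- what changed: Replaces A's row-by-row running-value loop with a segment algorithm: an inner scan jumps to the next non-blank cell and the whole run of blank-celled records is filled with one value per segment.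
import Mathlib
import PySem

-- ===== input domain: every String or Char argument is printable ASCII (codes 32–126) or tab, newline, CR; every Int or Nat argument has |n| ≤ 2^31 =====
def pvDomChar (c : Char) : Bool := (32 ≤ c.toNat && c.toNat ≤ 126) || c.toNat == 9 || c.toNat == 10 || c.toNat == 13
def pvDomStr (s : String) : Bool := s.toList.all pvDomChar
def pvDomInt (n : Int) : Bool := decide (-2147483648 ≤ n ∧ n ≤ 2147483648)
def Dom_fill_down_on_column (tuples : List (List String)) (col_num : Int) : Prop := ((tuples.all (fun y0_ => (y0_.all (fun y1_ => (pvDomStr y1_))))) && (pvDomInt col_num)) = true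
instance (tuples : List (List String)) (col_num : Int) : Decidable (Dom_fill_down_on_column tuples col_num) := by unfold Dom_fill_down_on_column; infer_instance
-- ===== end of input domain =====

-- B replaces A's row-by-row running-value loop with a segment algorithm (scan to the next non-blank cell, fill the whole blank run at once); alternative decomposition, same cost.


-- ===== PORT A =====
-- one loop: update curr_val, copy the record, overwrite the column, append
def fill_down_on_column (tuples : List (List String)) (col_num : Int) : List (List String) :=
  (tuples.foldl
    (fun (st : List (List String) × String) rec =>
      let curr_val := if PySem.Str.len (PySem.List.pyGetD rec col_num "") > 0
                      then PySem.List.pyGetD rec col_num "" else st.2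
      (st.1 ++ [PySem.List.pySetD rec col_num curr_val], curr_val))
    ([], "BLANK")).1

-- ===== PORT B =====
-- Source B's outer while loop, one recursive call per segment: the inner scan is
-- takeWhile/dropWhile on "cell is blank", the slice tuples[i:j] is the takeWhile part.
def pvBlank (col_num : Int) (rec : List String) : Bool :=
  PySem.Str.len (PySem.List.pyGetD rec col_num "") == 0

def pvGo (col_num : Int) (rows : List (List String)) (val : String) : List (List String) :=
  let blanks := rows.takeWhile (pvBlank col_num)
  match h : rows.dropWhile (pvBlank col_num) with
  | [] => blanks.map (fun rec => PySem.List.pySetD rec col_num val)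
  | hd :: tl =>
      let new_val := PySem.List.pyGetD hd col_num ""
      blanks.map (fun rec => PySem.List.pySetD rec col_num val)
        ++ [PySem.List.pySetD hd col_num new_val]
        ++ pvGo col_num tl new_val
termination_by rows.length
decreasing_by
  have h1 := List.length_dropWhile_le (pvBlank col_num) rows
  rw [h] at h1
  simp at h1
  omega

def fill_down_on_column_alt (tuples : List (List String)) (col_num : Int) : List (List String) :=
  pvGo col_num tuples "BLANK"

-- ===== PRECONDITION & SPEC =====
-- Pre_ excludes exactly the inputs where Python A raises IndexError: some record does not admit col_num as an index.
def Pre_fill_down_on_column (tuples : List (List String)) (col_num : Int) : Prop :=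
  ∀ rec ∈ tuples, PySem.Raise.InRange rec.length col_num
instance (tuples : List (List String)) (col_num : Int) : Decidable (Pre_fill_down_on_column tuples col_num) := by unfold Pre_fill_down_on_column; infer_instance
def pvWitness_fill_down_on_column : List (List String) × Int := ([["a", ""], ["", "b"]], 0)

def Spec_fill_down_on_column (tuples : List (List String)) (col_num : Int) (out : List (List String)) : Prop := out = fill_down_on_column_alt tuples col_num
instance (tuples : List (List String)) (col_num : Int) (out : List (List String)) : Decidable (Spec_fill_down_on_column tuples col_num out) := by unfold Spec_fill_down_on_column; infer_instance

-- ===== CLAIM (what is proved, stated in full; the proofs are below) =====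
def Claim_equal_fill_down_on_column : Prop := ∀ (tuples : List (List String)) (col_num : Int), Dom_fill_down_on_column tuples col_num → Pre_fill_down_on_column tuples col_num → Spec_fill_down_on_column tuples col_num (fill_down_on_column tuples col_num)

-- ===== LEMMAS AND PROOFS =====
-- pvGo consumes one record per step, branching on whether its cell is blank
lemma pvGo_cons (col : Int) (r : List String) (rest : List (List String)) (val : String) :
    pvGo col (r :: rest) val =
      (if PySem.Str.len (PySem.List.pyGetD r col "") > 0
       then PySem.List.pySetD r col (PySem.List.pyGetD r col "") :: pvGo col rest (PySem.List.pyGetD r col "")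
       else PySem.List.pySetD r col val :: pvGo col rest val) := by
  have hlen : (0:Int) <= PySem.Str.len (PySem.List.pyGetD r col "") := by
    simp [PySem.Str.len_eq]
  by_cases hb : pvBlank col r
  . -- blank cell: goes into the takeWhile run
    have hnot : ¬ PySem.Str.len (PySem.List.pyGetD r col "") > 0 := by
      simp only [pvBlank, beq_iff_eq] at hb; omega
    have hd : List.dropWhile (pvBlank col) (r :: rest) = List.dropWhile (pvBlank col) rest := by
      simp [hb]
    rw [if_neg hnot, pvGo]
    rw [List.takeWhile_cons]
    simp only [hb, ite_true]
    conv_rhs => rw [pvGo]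
    split <;> rename_i heq <;> rw [hd] at heq <;> split <;> rename_i heq2 <;> simp_all
  . -- non-blank cell: head of the dropWhile part
    have hpos : PySem.Str.len (PySem.List.pyGetD r col "") > 0 := by
      simp only [pvBlank, beq_iff_eq] at hb; omega
    have hd : List.dropWhile (pvBlank col) (r :: rest) = r :: rest := by
      simp [hb]
    rw [if_pos hpos, pvGo]
    split <;> rename_i heq <;> rw [hd] at heq
    . exact absurd heq (by simp)
    . injection heq with h1 h2
      subst h1; subst h2
      simp [hb]

-- A's fold equals B's segment recursion, for any accumulator and current value
lemma fill_loop (col : Int) (tuples : List (List String)) :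
    ∀ (acc : List (List String)) (curr : String),
    (tuples.foldl
      (fun (st : List (List String) × String) rec =>
        let curr_val := if PySem.Str.len (PySem.List.pyGetD rec col "") > 0
                        then PySem.List.pyGetD rec col "" else st.2
        (st.1 ++ [PySem.List.pySetD rec col curr_val], curr_val))
      (acc, curr)).1
    = acc ++ pvGo col tuples curr := by
  induction tuples with
  | nil => intro acc curr; simp [pvGo]
  | cons r rest ih =>
      intro acc curr
      rw [pvGo_cons]
      simp only [List.foldl_cons]
      by_cases hpos : PySem.Str.len (PySem.List.pyGetD r col "") > 0
      · simp only [if_pos hpos]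
        rw [ih]
        simp
      · simp only [if_neg hpos]
        rw [ih]
        simp

-- ===== VERDICT (by name: the statement is the Claim_ definition above) =====
theorem fill_down_on_column_spec : Claim_equal_fill_down_on_column := by
  intro tuples col_num _ _
  unfold Spec_fill_down_on_column fill_down_on_column fill_down_on_column_alt
  simpa using fill_loop col_num tuples [] "BLANK"
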